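-- pv_equiv track=rewrite | github.com/PorUna-byte/MCP-RiskCue | Data/modify_env_info.py | filter_data_by_server_path
-- ===== SOURCE A (Python) =====
-- from collections import defaultdict, Counter
--
-- def filter_data_by_server_path(data, max_count=3):
--     """
--     过滤数据，确保每个 server_path 出现次数不超过 max_count
--
--     Args:
--         data (list): 数据列表
--         max_count (int): 每个 server_path 的最大出现次数
--
--     Returns:
--         list: 过滤后的数据列表
--     """
--     server_path_counts = defaultdict(int)
--     filtered_data = []
--
--     for entry in data:
--         server_path = entry.get('server_path', '')
--         if server_path_counts[server_path] < max_count: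
--             filtered_data.append(entry)
--             server_path_counts[server_path] += 1
--
--     return filtered_data
-- ===== SOURCE B (Python) =====
-- def filter_data_by_server_path(data, max_count=3):
--     """Keep an entry only if fewer than max_count earlier entries share its server_path.
--
--     Stateless re-implementation: instead of a running counter dict, each entry is
--     judged by a direct count over the prefix of the list before it.
--     """
--     def key(entry):
--         return entry.get('server_path', '')
--     return [entry for i, entry in enumerate(data)
--             if sum(1 for prev in data[:i] if key(prev) == key(entry)) < max_count]
-- ===== Notes on version B (the rewrite author's own statement) =====
-- stated objective: alternative
-- what changed: Replaced the stateful running per-path counter dict with a stateless list-comprehension filter that keeps entry i iff fewer than max_count earlier entries share its server_path.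
import Mathlib
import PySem

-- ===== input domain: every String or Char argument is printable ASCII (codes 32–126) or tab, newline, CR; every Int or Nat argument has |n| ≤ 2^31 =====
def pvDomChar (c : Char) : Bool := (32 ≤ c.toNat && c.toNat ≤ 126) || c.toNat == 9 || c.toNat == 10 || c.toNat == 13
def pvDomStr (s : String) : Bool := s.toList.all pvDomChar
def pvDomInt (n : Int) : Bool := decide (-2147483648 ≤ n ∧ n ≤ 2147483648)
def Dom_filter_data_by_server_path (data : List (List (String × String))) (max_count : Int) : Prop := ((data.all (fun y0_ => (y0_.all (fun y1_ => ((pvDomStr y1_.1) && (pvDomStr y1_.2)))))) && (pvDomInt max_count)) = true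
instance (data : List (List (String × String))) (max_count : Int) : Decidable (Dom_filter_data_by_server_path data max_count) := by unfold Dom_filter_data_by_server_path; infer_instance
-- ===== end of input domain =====

-- B replaces A's stateful running per-path counter with a stateless filter that keeps
-- an entry iff fewer than max_count earlier entries share its server_path (alternative decomposition).


-- ===== PORT A =====
-- entry.get('server_path', '') (entries are dicts, ported as association lists)
def pvGetSP (e : List (String × String)) : String :=
  PySem.Dict.getD (PySem.Dict.mk e) "server_path" ""

-- loop body of A: state = (server_path_counts, filtered_data)
-- (server_path_counts[server_path] on a defaultdict(int) reads 0 for a missing key → Dict.getD _ _ 0;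
--  the implicit insertion of the 0 default does not affect any later read nor the returned list)
def pvStepA (max_count : Int)
    (st : PySem.Dict String Int × List (List (String × String)))
    (entry : List (String × String)) :
    PySem.Dict String Int × List (List (String × String)) :=
  let server_path := pvGetSP entry
  let c := st.1.getD server_path 0
  if c < max_count then (st.1.insert server_path (c + 1), st.2 ++ [entry]) else st

def filter_data_by_server_path (data : List (List (String × String))) (max_count : Int) : List (List (String × String)) :=
  (data.foldl (pvStepA max_count) (PySem.Dict.empty, [])).2

-- ===== PORT B =====
-- the comprehension's filter condition: # of earlier entries (data[:i]) with the same server_path < max_count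
def pvStepB (data : List (List (String × String))) (max_count : Int)
    (out : List (List (String × String))) (p : Int × List (String × String)) :
    List (List (String × String)) :=
  let sp := pvGetSP p.2
  let earlier : Int := ((data.take p.1.toNat).countP (fun prev => pvGetSP prev == sp) : Nat)
  if earlier < max_count then out ++ [p.2] else out

def filter_data_by_server_path_alt (data : List (List (String × String))) (max_count : Int) : List (List (String × String)) :=
  (PySem.List.enumerate data 0).foldl (pvStepB data max_count) []

-- ===== PRECONDITION & SPEC =====
def Spec_filter_data_by_server_path (data : List (List (String × String))) (max_count : Int) (out : List (List (String × String))) : Prop := out = filter_data_by_server_path_alt data max_count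
instance (data : List (List (String × String))) (max_count : Int) (out : List (List (String × String))) : Decidable (Spec_filter_data_by_server_path data max_count out) := by unfold Spec_filter_data_by_server_path; infer_instance

-- ===== CLAIM (what is proved, stated in full; the proofs are below) =====
def Claim_equal_filter_data_by_server_path : Prop := ∀ (data : List (List (String × String))) (max_count : Int), Dom_filter_data_by_server_path data max_count → Spec_filter_data_by_server_path data max_count (filter_data_by_server_path data max_count)

-- ===== LEMMAS AND PROOFS =====

-- common recursive characterisation: process `rest`, `pre` being the entries already seen
def pvGo (mc : Int) : List (List (String × String)) → List (List (String × String)) → List (List (String × String))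
  | _, [] => []
  | pre, e :: rest =>
      (if ((pre.countP (fun p => pvGetSP p == pvGetSP e) : Nat) : Int) < mc then [e] else [])
        ++ pvGo mc (pre ++ [e]) rest

lemma pvA_loop (mc : Int) :
    ∀ (rest pre : List (List (String × String))) (d : PySem.Dict String Int)
      (out : List (List (String × String))),
      (∀ k, d.getD k 0 = min ((pre.countP (fun p => pvGetSP p == k) : Nat) : Int) (max mc 0)) →
      (rest.foldl (pvStepA mc) (d, out)).2 = out ++ pvGo mc pre rest := by
  intro rest
  induction rest with
  | nil => intro pre d out _; simp [pvGo]
  | cons e rest ih =>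
    intro pre d out hinv
    have hc := hinv (pvGetSP e)
    have hcnt0 : (0 : Int) ≤ ((pre.countP (fun p => pvGetSP p == pvGetSP e) : Nat) : Int) := by positivity
    simp only [List.foldl_cons, pvGo]
    set cnt : Int := ((pre.countP (fun p => pvGetSP p == pvGetSP e) : Nat) : Int) with hcntdef
    by_cases h : d.getD (pvGetSP e) 0 < mc
    · have hlt : cnt < mc := by omega
      have hstep : pvStepA mc (d, out) e
          = (d.insert (pvGetSP e) (d.getD (pvGetSP e) 0 + 1), out ++ [e]) := by
        simp [pvStepA, h]
      rw [hstep, ih (pre ++ [e])]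
      · simp [hlt]
      · intro k
        rw [PySem.Dict.getD_insert]
        have hcntk := hinv k
        by_cases hk : k = pvGetSP e
        · subst hk
          simp only [List.countP_append]
          simp only [List.countP_cons, List.countP_nil, beq_self_eq_true]
          push_cast
          omega
        · simp only [if_neg hk, List.countP_append]
          have hne : ([e].countP (fun p => pvGetSP p == k)) = 0 := by
            simp only [List.countP_cons, List.countP_nil]
            have : (pvGetSP e == k) = false := by
              simp [beq_eq_false_iff_ne]; exact fun hh => hk hh.symm
            simp [this]
          rw [hne]
          simpa using hcntk
    · have hge : ¬ cnt < mc := by omega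
      have hstep : pvStepA mc (d, out) e = (d, out) := by
        simp [pvStepA, h]
      rw [hstep, ih (pre ++ [e])]
      · simp [hge]
      · intro k
        have hcntk := hinv k
        by_cases hk : k = pvGetSP e
        · subst hk
          simp only [List.countP_append, List.countP_cons, List.countP_nil,
            beq_self_eq_true]
          push_cast
          omega
        · simp only [List.countP_append]
          have hne : ([e].countP (fun p => pvGetSP p == k)) = 0 := by
            simp only [List.countP_cons, List.countP_nil]
            have : (pvGetSP e == k) = false := by
              simp [beq_eq_false_iff_ne]; exact fun hh => hk hh.symm
            simp [this]
          rw [hne]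
          simpa using hcntk

lemma pvB_loop (data : List (List (String × String))) (mc : Int) :
    ∀ (rest : List (List (String × String))) (n : Nat)
      (out : List (List (String × String))),
      data.drop n = rest →
      (PySem.List.enumerate rest ((n : Nat) : Int)).foldl (pvStepB data mc) out
        = out ++ pvGo mc (data.take n) rest := by
  intro rest
  induction rest with
  | nil => intro n out _; simp [PySem.List.enumerate_nil, pvGo]
  | cons e rest ih =>
    intro n out hdrop
    have hgetn : data[n]? = some e := by
      have h : (data.drop n)[0]? = data[n + 0]? := List.getElem?_drop
      rw [hdrop] at h; simpa using h.symm
    have hdrop1 : data.drop (n + 1) = rest := by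
      have h1 : (data.drop n).drop 1 = rest := by rw [hdrop]; rfl
      rw [List.drop_drop] at h1
      simpa [Nat.add_comm] using h1
    have htake : data.take (n + 1) = data.take n ++ [e] := by
      rw [List.take_add_one, hgetn]; rfl
    rw [PySem.List.enumerate_cons]
    simp only [List.foldl_cons, pvGo]
    have htoNat : ((n : Int)).toNat = n := by simp
    by_cases h : ((((data.take n).countP (fun prev => pvGetSP prev == pvGetSP e)) : Nat) : Int) < mc
    · have hstep : pvStepB data mc out ((n : Int), e) = out ++ [e] := by
        simp only [pvStepB, htoNat]
        rw [if_pos h]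
      rw [hstep]
      have : ((n : Int) + 1) = (((n + 1 : Nat) : Nat) : Int) := by push_cast; ring
      rw [this, ih (n + 1) (out ++ [e]) hdrop1]
      rw [htake]
      simp [h]
    · have hstep : pvStepB data mc out ((n : Int), e) = out := by
        simp only [pvStepB, htoNat]
        rw [if_neg h]
      rw [hstep]
      have : ((n : Int) + 1) = (((n + 1 : Nat) : Nat) : Int) := by push_cast; ring
      rw [this, ih (n + 1) out hdrop1]
      rw [htake]
      simp [h]

-- ===== VERDICT (by name: the statement is the Claim_ definition above) =====
theorem filter_data_by_server_path_spec : Claim_equal_filter_data_by_server_path := by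
  intro data max_count _
  unfold Spec_filter_data_by_server_path filter_data_by_server_path filter_data_by_server_path_alt
  rw [pvA_loop max_count data [] PySem.Dict.empty []
      (by intro k; simp [PySem.Dict.getD_empty]; try omega)]
  have h0 : ((0 : Nat) : Int) = (0 : Int) := by norm_num
  rw [← h0, pvB_loop data max_count data 0 [] (by simp)]
  simp
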